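-- pv_equiv track=rewrite | github.com/dino3111/aulasFP | tp12-soccer/fut2.py | dictpais
-- ===== SOURCE A (Python) =====
-- def dictpais(lista_clubes_data):
--     resultado = {}
--
--     for clubes in lista_clubes_data:
--         pais = clubes[2]
--         clubes = clubes[1]
--
--         if pais not in resultado:
--             resultado[pais] = []
--
--         resultado[pais].append(clubes)
--
--     return resultado
-- ===== SOURCE B (Python) =====
-- def dictpais(lista_clubes_data):
--     # Two-pass: ordered dedup of countries, then one filtering comprehension per country.
--     paises = list(dict.fromkeys(c[2] for c in lista_clubes_data))
--     return {p: [c[1] for c in lista_clubes_data if c[2] == p] for p in paises}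
-- ===== Notes on version B (the rewrite author's own statement) =====
-- stated objective: alternative
-- what changed: Replaces the single-pass dict accumulation (membership test + in-place list append per element) with a two-pass strategy: an ordered dedup of the country keys followed by one filter-comprehension per country building the whole dict in a comprehension.
import Mathlib
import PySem

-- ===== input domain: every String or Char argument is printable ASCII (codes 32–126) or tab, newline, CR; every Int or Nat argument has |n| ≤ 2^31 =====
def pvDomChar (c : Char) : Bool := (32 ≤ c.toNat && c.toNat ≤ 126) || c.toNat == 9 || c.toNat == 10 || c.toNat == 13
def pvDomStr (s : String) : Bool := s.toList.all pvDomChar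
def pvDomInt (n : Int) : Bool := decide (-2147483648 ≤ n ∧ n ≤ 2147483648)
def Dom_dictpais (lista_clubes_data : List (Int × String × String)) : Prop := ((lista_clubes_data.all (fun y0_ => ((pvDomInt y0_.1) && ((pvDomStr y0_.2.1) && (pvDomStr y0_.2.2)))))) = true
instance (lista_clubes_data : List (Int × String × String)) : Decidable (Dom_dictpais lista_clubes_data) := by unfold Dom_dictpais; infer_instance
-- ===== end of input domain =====

-- B groups clubs by country via an ordered dedup of countries plus one filter pass per
-- country, instead of A's single-pass dict accumulation; same return value, alternative shape.

-- ===== PORT A =====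
-- one pass; per element: ensure the key exists (insert []), then append the club to its list
def dictpais (lista_clubes_data : List (Int × String × String)) : List (String × List String) :=
  (lista_clubes_data.foldl
    (fun resultado clubes =>
      let pais := clubes.2.2
      let clube := clubes.2.1
      let resultado := if resultado.contains pais then resultado else resultado.insert pais []
      resultado.modify pais [] (fun v => v ++ [clube]))
    PySem.Dict.empty).items

-- ===== PORT B =====
def dictpais_alt (lista_clubes_data : List (Int × String × String)) : List (String × List String) :=
  (PySem.List.dedup (lista_clubes_data.map (fun c => c.2.2))).map
    (fun p => (p, (lista_clubes_data.filter (fun c => c.2.2 == p)).map (fun c => c.2.1)))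

-- ===== PRECONDITION & SPEC =====
def Spec_dictpais (lista_clubes_data : List (Int × String × String)) (out : List (String × List String)) : Prop := out = dictpais_alt lista_clubes_data
instance (lista_clubes_data : List (Int × String × String)) (out : List (String × List String)) : Decidable (Spec_dictpais lista_clubes_data out) := by unfold Spec_dictpais; infer_instance

-- ===== CLAIM (what is proved, stated in full; the proofs are below) =====
def Claim_equal_dictpais : Prop := ∀ (lista_clubes_data : List (Int × String × String)), Dom_dictpais lista_clubes_data → Spec_dictpais lista_clubes_data (dictpais lista_clubes_data)

-- ===== LEMMAS AND PROOFS =====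

-- A's 'ensure key, then append' step is one Dict.modify
theorem pv_step_eq (d : PySem.Dict String (List String)) (k : String) (v : String) :
    (if d.contains k then d else d.insert k []).modify k [] (fun l => l ++ [v])
      = d.modify k [] (fun l => l ++ [v]) := by
  split_ifs with h
  · rfl
  · have h' : d.contains k = false := by simpa using h
    simp only [PySem.Dict.modify, PySem.Dict.getD_insert_self, PySem.Dict.insert_insert_self]
    rw [PySem.Dict.getD_of_not_contains d [] h']

theorem pv_fold_eq (l : List (Int × String × String)) :
    (l.foldl
      (fun resultado clubes =>
        let pais := clubes.2.2
        let clube := clubes.2.1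
        let resultado := if resultado.contains pais then resultado else resultado.insert pais []
        resultado.modify pais [] (fun v => v ++ [clube]))
      PySem.Dict.empty)
    = (l.foldl (fun d c => d.modify c.2.2 [] (fun v => v ++ [c.2.1])) PySem.Dict.empty) := by
  suffices h : ∀ d : PySem.Dict String (List String),
      (l.foldl
        (fun resultado clubes =>
          let pais := clubes.2.2
          let clube := clubes.2.1
          let resultado := if resultado.contains pais then resultado else resultado.insert pais []
          resultado.modify pais [] (fun v => v ++ [clube])) d)
      = (l.foldl (fun d c => d.modify c.2.2 [] (fun v => v ++ [c.2.1])) d) from h _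
  intro d
  induction l generalizing d with
  | nil => rfl
  | cons c cs ih =>
    simp only [List.foldl_cons]
    rw [pv_step_eq d c.2.2 c.2.1, ih]

-- ===== VERDICT (by name: the statement is the Claim_ definition above) =====
theorem dictpais_spec : Claim_equal_dictpais := by
  intro l _
  show dictpais l = dictpais_alt l
  unfold dictpais dictpais_alt
  rw [pv_fold_eq]
  set D := l.foldl (fun d c => d.modify c.2.2 [] (fun v => v ++ [c.2.1])) PySem.Dict.empty with hD
  have hnd : D.keys.Nodup := by
    rw [hD]
    exact PySem.Dict.nodup_keys_foldl_modify_key l (fun c => c.2.2) []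
      (fun _ c => (fun v => v ++ [c.2.1])) _ (by simp)
  rw [PySem.Dict.items_eq_map_keys D hnd []]
  have hkeys : D.keys = PySem.List.dedup (l.map (fun c => c.2.2)) := by
    rw [hD, PySem.Dict.keys_foldl_modify_key l (fun c => c.2.2) []
      (fun _ c => (fun v => v ++ [c.2.1])), PySem.List.dedup_eq_ofList]
    simp [PySem.Set.update_nil_left]
  rw [hkeys]
  apply List.map_congr_left
  intro p _
  have hget : D.getD p [] = (l.filter (fun c => c.2.2 == p)).map (fun c => c.2.1) := by
    have hmap : (l.foldl (fun d c => d.modify c.2.2 [] (fun v => v ++ [c.2.1])) PySem.Dict.empty)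
        = ((l.map (fun c => (c.2.2, c.2.1))).foldl
            (fun d p => d.modify p.1 [] (fun v => v ++ [p.2])) PySem.Dict.empty) := by
      rw [List.foldl_map]
    rw [hD, hmap, PySem.Dict.getD_foldl_modify_append]
    simp [List.filter_map, Function.comp_def]
  rw [hget]
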